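-- pv_equiv track=rewrite | github.com/dujebuljat/algoritmi | rec_nesto_sa_parnim_br_i_indeksom.py | rec
-- ===== SOURCE A (Python) =====
-- def rec(lista, index):
--     if index < 0:
--         return lista
--     else:
--         if lista[index] % 2 != 0:
--             lista.remove(lista[index])
--             return rec(lista, index - 1)
--         else:
--             return rec(lista, index - 1)
-- ===== SOURCE B (Python) =====
-- def rec(lista, index):
--     for i in range(index, -1, -1):
--         if lista[i] % 2 != 0:
--             del lista[i]
--     return lista
-- ===== Notes on version B (the rewrite author's own statement) =====
-- stated objective: simpler
-- what changed: Recursion with remove-by-value (lista.remove(lista[index])) is replaced by an iterative countdown loop that deletes by position (del lista[i]); same in-place mutation and same final list, no recursion depth limit.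
import Mathlib
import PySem

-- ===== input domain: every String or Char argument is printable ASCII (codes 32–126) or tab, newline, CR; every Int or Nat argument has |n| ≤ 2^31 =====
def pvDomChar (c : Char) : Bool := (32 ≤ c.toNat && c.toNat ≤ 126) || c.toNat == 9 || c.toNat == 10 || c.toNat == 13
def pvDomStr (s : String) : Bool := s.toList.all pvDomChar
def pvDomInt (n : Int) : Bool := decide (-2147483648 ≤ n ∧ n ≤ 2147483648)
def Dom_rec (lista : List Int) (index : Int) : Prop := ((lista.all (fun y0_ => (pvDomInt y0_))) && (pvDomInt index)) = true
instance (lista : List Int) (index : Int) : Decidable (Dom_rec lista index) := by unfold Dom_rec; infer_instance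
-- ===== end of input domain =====

-- B replaces A's recursion + remove-by-value with an iterative countdown loop deleting by position (simpler; same in-place mutation of `lista`, equivalence proved about the returned/final list).


-- ===== PORT A =====
-- literal port of A: recursion from `index` down; lista[index] via pyGet? (none = IndexError,
-- excluded by Pre_rec); lista.remove(v) via remove? — v is lista[index] so it is always present,
-- the `.getD lista` default is unreachable.
def rec (lista : List Int) (index : Int) : List Int :=
  if index < 0 then lista
  else
    match PySem.List.pyGet? lista index with
    | none => lista
    | some v =>
      if PySem.Int.mod v 2 ≠ 0 then
        rec ((PySem.List.remove? lista v).getD lista) (index - 1)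
      else
        rec lista (index - 1)
termination_by (index + 1).toNat
decreasing_by all_goals omega

-- ===== PORT B =====
-- loop body of B: `if lista[i] % 2 != 0: del lista[i]` (pyGet? none = IndexError, excluded by
-- Pre_rec; del lista[i] is pop? at i, whose none case is likewise unreachable under Pre_rec).
def recStep (acc : List Int) (i : Int) : List Int :=
  match PySem.List.pyGet? acc i with
  | none => acc
  | some v =>
    if PySem.Int.mod v 2 ≠ 0 then
      match PySem.List.pop? acc i with
      | none => acc
      | some r => r.2
    else acc

-- literal port of B: `for i in range(index, -1, -1): …; return lista`
def rec_alt (lista : List Int) (index : Int) : List Int :=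
  (PySem.List.pyRange index (-1) (-1)).foldl recStep lista

-- ===== PRECONDITION & SPEC =====
-- A raises IndexError iff index >= len(lista) (any negative index returns immediately).
def Pre_rec (lista : List Int) (index : Int) : Prop := index < (lista.length : Int)
instance (lista : List Int) (index : Int) : Decidable (Pre_rec lista index) := by unfold Pre_rec; infer_instance
def pvWitness_rec : List Int × Int := ([1, 2, 3], 2)

def Spec_rec (lista : List Int) (index : Int) (out : List Int) : Prop := out = rec_alt lista index
instance (lista : List Int) (index : Int) (out : List Int) : Decidable (Spec_rec lista index out) := by unfold Spec_rec; infer_instance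

-- ===== CLAIM (what is proved, stated in full; the proofs are below) =====
def Claim_equal_rec : Prop := ∀ (lista : List Int) (index : Int), Dom_rec lista index → Pre_rec lista index → Spec_rec lista index (rec lista index)

-- ===== LEMMAS AND PROOFS =====

-- the "evens" predicate both programs keep
def pvEven (v : Int) : Bool := decide (v % 2 = 0)

-- closed form both ports reach after processing indices n-1 ... 0:
-- odd elements of the first n positions are gone, the rest is untouched.
def G (l : List Int) (n : Nat) : List Int := (l.take n).filter pvEven ++ l.drop n

lemma mod_two_ne (v : Int) : (PySem.Int.mod v 2 ≠ 0) ↔ (pvEven v = false) := by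
  rw [PySem.Int.mod_eq_emod_of_pos (by norm_num)]
  simp [pvEven]

-- splitting one odd element out: removing it from position |s| commutes with G
lemma G_key (s t : List Int) (v : Int) (hp : pvEven v = false) :
    ∀ n : Nat, s.length ≤ n → G (s ++ t) n = G (s ++ v :: t) (n + 1) := by
  induction s with
  | nil =>
    intro n _
    simp [G, hp]
  | cons x s ih =>
    intro n hn
    obtain ⟨m, rfl⟩ : ∃ m, n = m + 1 := ⟨n - 1, by simp at hn; omega⟩
    have hm : s.length ≤ m := by simp at hn; omega
    by_cases hx : pvEven x = true
    · simpa [G, List.filter_cons, hx] using congrArg (List.cons x) (ih m hm)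
    · simp only [Bool.not_eq_true] at hx
      simpa [G, List.filter_cons, hx] using ih m hm

-- an even element at the boundary position just moves across it
lemma G_key2 (s t : List Int) (v : Int) (hp : pvEven v = true) :
    G (s ++ v :: t) s.length = G (s ++ v :: t) (s.length + 1) := by
  induction s with
  | nil => simp [G, hp]
  | cons x s ih =>
    by_cases hx : pvEven x = true
    · simpa [G, List.filter_cons, hx] using congrArg (List.cons x) ih
    · simp only [Bool.not_eq_true] at hx
      simpa [G, List.filter_cons, hx] using ih

-- A's odd step: erasing the first occurrence of v = l[n] (v odd), then closing at n, equals closing at n+1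
lemma G_erase (l : List Int) (n : Nat) (v : Int) (h : n < l.length) (hv : l[n] = v)
    (hp : pvEven v = false) : G (l.erase v) n = G l (n + 1) := by
  have hmem : v ∈ l := hv ▸ List.getElem_mem h
  obtain ⟨s, t, hvs, hl, he⟩ := List.exists_erase_eq hmem
  subst hl
  have hsn : s.length ≤ n := by
    by_contra hc
    rw [not_le] at hc
    have hin : (s ++ v :: t)[n] ∈ s := by
      rw [List.getElem_append_left hc]
      exact List.getElem_mem hc
    exact hvs (hv ▸ hin)
  rw [he]
  exact G_key s t v hp n hsn

-- B's odd step: deleting position n (l[n] odd), then closing at n, equals closing at n+1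
lemma G_eraseIdx (l : List Int) (n : Nat) (h : n < l.length) (hp : pvEven l[n] = false) :
    G (l.eraseIdx n) n = G l (n + 1) := by
  have hl : l = l.take n ++ l[n] :: l.drop (n + 1) := by
    conv_lhs => rw [← List.take_append_drop n l, List.drop_eq_getElem_cons h]
  have hlen : (l.take n).length = n := by simp; omega
  rw [List.eraseIdx_eq_take_drop_succ]
  calc G (l.take n ++ l.drop (n + 1)) n
      = G (l.take n ++ l[n] :: l.drop (n + 1)) (n + 1) :=
        G_key (l.take n) (l.drop (n + 1)) l[n] hp n (by omega)
    _ = G l (n + 1) := by rw [← hl]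

-- even step: an even element at position n just moves across the boundary
lemma G_even (l : List Int) (n : Nat) (h : n < l.length) (hp : pvEven l[n] = true) :
    G l n = G l (n + 1) := by
  have hl : l = l.take n ++ l[n] :: l.drop (n + 1) := by
    conv_lhs => rw [← List.take_append_drop n l, List.drop_eq_getElem_cons h]
  have hlen : (l.take n).length = n := by simp; omega
  have hk := G_key2 (l.take n) (l.drop (n + 1)) l[n] hp
  rw [hlen] at hk
  rw [hl]
  exact hk

-- characterization of port A: rec l (n-1) closes the first n positions
lemma rec_eq_G (n : Nat) : ∀ l : List Int, n ≤ l.length → rec l ((n : Int) - 1) = G l n := by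
  induction n with
  | zero => intro l _; rw [rec]; simp [G]
  | succ n ih =>
    intro l hlen
    have hn : n < l.length := by omega
    have hcast : ((n + 1 : Nat) : Int) - 1 = (n : Int) := by push_cast; ring
    have hget : PySem.List.pyGet? l (n : Int) = some l[n] := PySem.List.pyGet?_ofNat l n hn
    rw [hcast, rec, if_neg (by omega), hget]
    dsimp only
    by_cases hodd : PySem.Int.mod l[n] 2 ≠ 0
    · have hp : pvEven l[n] = false := (mod_two_ne _).mp hodd
      have hmem : l[n] ∈ l := List.getElem_mem hn
      rw [if_pos hodd, PySem.List.remove?_eq_some_erase l l[n] hmem]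
      have hel : (l.erase l[n]).length = l.length - 1 := List.length_erase_of_mem hmem
      rw [Option.getD_some, ih (l.erase l[n]) (by omega)]
      exact G_erase l n l[n] hn rfl hp
    · have hp : pvEven l[n] = true := by
        rcases Bool.eq_false_or_eq_true (pvEven l[n]) with hb | hb
        · exact hb
        · exact absurd ((mod_two_ne _).mpr hb) hodd
      rw [if_neg hodd, ih l (by omega)]
      exact G_even l n hn hp

-- characterization of port B: the countdown fold from n-1 closes the first n positions
lemma fold_eq_G (n : Nat) : ∀ l : List Int, n ≤ l.length →
    (PySem.List.pyRange ((n : Int) - 1) (-1) (-1)).foldl recStep l = G l n := by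
  induction n with
  | zero =>
    intro l _
    rw [PySem.List.pyRange_neg_one_eq_nil (by omega)]
    simp [G]
  | succ n ih =>
    intro l hlen
    have hn : n < l.length := by omega
    have hcast : ((n + 1 : Nat) : Int) - 1 = (n : Int) := by push_cast; ring
    have hget : PySem.List.pyGet? l (n : Int) = some l[n] := PySem.List.pyGet?_ofNat l n hn
    rw [hcast, PySem.List.pyRange_neg_one_cons (by omega), List.foldl_cons]
    have hstep : recStep l (n : Int) =
        if PySem.Int.mod l[n] 2 ≠ 0 then l.eraseIdx n else l := by
      unfold recStep
      rw [hget, PySem.List.pop?_natCast l n hn]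
    by_cases hodd : PySem.Int.mod l[n] 2 ≠ 0
    · have hp : pvEven l[n] = false := (mod_two_ne _).mp hodd
      rw [hstep, if_pos hodd]
      have hel : (l.eraseIdx n).length = l.length - 1 := List.length_eraseIdx_of_lt hn
      rw [ih (l.eraseIdx n) (by omega)]
      exact G_eraseIdx l n hn hp
    · have hp : pvEven l[n] = true := by
        rcases Bool.eq_false_or_eq_true (pvEven l[n]) with hb | hb
        · exact hb
        · exact absurd ((mod_two_ne _).mpr hb) hodd
      rw [hstep, if_neg hodd, ih l (by omega)]
      exact G_even l n hn hp

-- ===== VERDICT (by name: the statement is the Claim_ definition above) =====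
theorem rec_spec : Claim_equal_rec := by
  intro lista index _ hpre
  unfold Spec_rec rec_alt
  unfold Pre_rec at hpre
  by_cases hneg : index < 0
  · rw [rec, if_pos hneg, PySem.List.pyRange_neg_one_eq_nil (by omega)]
    rfl
  · rw [not_lt] at hneg
    have hidx : index = ((index.toNat + 1 : Nat) : Int) - 1 := by omega
    have hle : index.toNat + 1 ≤ lista.length := by omega
    rw [hidx, rec_eq_G (index.toNat + 1) lista hle, fold_eq_G (index.toNat + 1) lista hle]
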